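-- pv_equiv track=rewrite | github.com/Alg5rithm/OMJ | PROGRAMMERS/[PG]더 맵게.py | solution
-- ===== SOURCE A (Python) =====
-- def solution(scoville, K):
--     counter = 0
--     scoville.sort()
--     while True:
--         if scoville[0] < K:
--             newScoville = scoville[0] + (scoville[1] * 2)
--             del scoville[0]
--             del scoville[0]
--             scoville.append(newScoville)
--             counter += 1
--             scoville.sort()
--         else:
--             break
--     return counter
-- ===== SOURCE B (Python) =====
-- def solution(scoville, K):
--     # Huffman-style two-queue mix: sort once, then pop the two smallest in O(1)
--     # from (remaining sorted originals, FIFO of created values, which come out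
--     # in nondecreasing order).  Note: unlike A, B does not mutate `scoville`.
--     base = sorted(scoville)
--     made = []          # created values, appended in nondecreasing order
--     i = 0              # next unused element of base
--     j = 0              # next unused element of made
--     count = 0
--
--     def pop():
--         nonlocal i, j
--         if j >= len(made) or (i < len(base) and base[i] <= made[j]):
--             v = base[i]   # IndexError here iff everything is exhausted
--             i += 1
--         else:
--             v = made[j]
--             j += 1
--         return v
--
--     while True:
--         if i < len(base) and (j >= len(made) or base[i] <= made[j]):
--             m = base[i]
--         else:
--             m = made[j]   # IndexError iff both queues are empty, as A on []
--         if m >= K: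
--             return count
--         a = pop()
--         b = pop()
--         made.append(a + 2 * b)
--         count += 1
-- ===== Notes on version B (the rewrite author's own statement) =====
-- stated objective: faster
-- what changed: A re-sorts the whole list after every mix (O(n^2 log n)); B sorts once and then uses the Huffman two-queue trick (sorted originals + FIFO of created values, which appear in nondecreasing order), so each mix is O(1) and the whole run is O(n log n). Pre_ excludes exactly the inputs on which A raises IndexError (the pot is exhausted while the minimum is still below K); B raises IndexError on the same inputs.
import Mathlib
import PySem

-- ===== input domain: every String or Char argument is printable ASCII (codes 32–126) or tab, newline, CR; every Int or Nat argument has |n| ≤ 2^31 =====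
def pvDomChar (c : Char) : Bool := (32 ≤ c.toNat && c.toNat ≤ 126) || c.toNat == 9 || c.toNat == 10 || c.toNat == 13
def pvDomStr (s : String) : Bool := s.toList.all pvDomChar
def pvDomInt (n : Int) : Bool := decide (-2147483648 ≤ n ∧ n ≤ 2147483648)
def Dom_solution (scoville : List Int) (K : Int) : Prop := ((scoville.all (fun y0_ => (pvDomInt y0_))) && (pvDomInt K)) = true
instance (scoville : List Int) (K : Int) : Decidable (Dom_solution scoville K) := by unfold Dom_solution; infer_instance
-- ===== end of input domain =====

-- B replaces A's re-sort-after-every-mix loop by the Huffman two-queue scheme: sort once,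
-- then pop the two smallest of (sorted originals, FIFO of created values) in O(1) per mix.
-- A sorts and consumes its argument list in place; B does not mutate it — the equivalence
-- proved here is about the RETURN value only.

-- ===== PORT A =====
-- helper cited by solGo's termination proof: scoville[1] succeeding means length ≥ 2
theorem pvLenTwo {xs : List Int} {y : Int} (h : PySem.List.pyGet? xs 1 = some y) :
    2 ≤ xs.length := by
  simp [PySem.List.pyGet?, PySem.List.pyIdx?] at h
  split at h
  · omega
  · simp_all

def solGo (sc : List Int) (K : Int) (counter : Int) : Int :=
  match _h0 : PySem.List.pyGet? sc 0 with
  | none => counter            -- Python: scoville[0] raises IndexError (outside Pre_)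
  | some s0 =>
    if s0 < K then
      match _h1 : PySem.List.pyGet? sc 1 with
      | none => counter        -- Python: scoville[1] raises IndexError (outside Pre_)
      | some s1 =>
        -- del scoville[0]; del scoville[0]; append newScoville; counter += 1; sort()
        solGo (PySem.List.sorted (sc.drop 2 ++ [s0 + s1 * 2]) (fun x => x)) K (counter + 1)
    else counter
termination_by sc.length
decreasing_by
  have h2 := pvLenTwo _h1
  rw [PySem.List.length_sorted]
  simp
  omega

def solution (scoville : List Int) (K : Int) : Int :=
  solGo (PySem.List.sorted scoville (fun x => x)) K 0

-- ===== PORT B =====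
-- pop the smaller front of (sorted originals, FIFO of created values); none = both empty
def popMin (base made : List Int) : Option (Int × List Int × List Int) :=
  match base, made with
  | [], [] => none
  | b :: bs, [] => some (b, bs, [])
  | [], m :: ms => some (m, [], ms)
  | b :: bs, m :: ms => if b ≤ m then some (b, bs, m :: ms) else some (m, b :: bs, ms)

-- cited by altGo's termination proof
theorem popMin_length {base made : List Int} {x : Int} {b2 m2 : List Int}
    (h : popMin base made = some (x, b2, m2)) :
    b2.length + m2.length + 1 = base.length + made.length := by
  rcases base with _ | ⟨b, bs⟩ <;> rcases made with _ | ⟨m, ms⟩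
  case nil.nil => simp [popMin] at h
  case nil.cons =>
    simp only [popMin, Option.some.injEq, Prod.mk.injEq] at h
    obtain ⟨rfl, rfl, rfl⟩ := h; simp
  case cons.nil =>
    simp only [popMin, Option.some.injEq, Prod.mk.injEq] at h
    obtain ⟨rfl, rfl, rfl⟩ := h; simp
  case cons.cons =>
    simp only [popMin] at h
    split at h <;>
      · simp only [Option.some.injEq, Prod.mk.injEq] at h
        obtain ⟨rfl, rfl, rfl⟩ := h
        simp; omega

def altGo (base made : List Int) (K : Int) (count : Int) : Int :=
  match _h : popMin base made with
  | none => count              -- Python: made[j] raises IndexError (outside Pre_)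
  | some (a, base1, made1) =>
    if K ≤ a then count
    else
      match _h2 : popMin base1 made1 with
      | none => count          -- Python: second pop raises IndexError (outside Pre_)
      | some (b, base2, made2) => altGo base2 (made2 ++ [a + 2 * b]) K (count + 1)
termination_by base.length + made.length
decreasing_by
  have l1 := popMin_length _h
  have l2 := popMin_length _h2
  simp
  omega

def solution_alt (scoville : List Int) (K : Int) : Int :=
  altGo (PySem.List.sorted scoville (fun x => x)) [] K 0

-- ===== PRECONDITION & SPEC =====
-- mixAll sc = the scoville value of the single pot obtained by always mixing the two
-- mildest peppers, ignoring K entirely: a function of the input alone (no stopping logic)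
def mixAll (sc : List Int) : Int :=
  match _h : PySem.List.sorted sc (fun x => x) with
  | [] => 0
  | [a] => a
  | a :: b :: rest => mixAll (rest ++ [a + 2 * b])
termination_by sc.length
decreasing_by
  have := congrArg List.length _h
  rw [PySem.List.length_sorted] at this
  simp at this
  simp
  omega

-- Pre_ excludes EXACTLY the inputs on which A raises IndexError (the pot is exhausted
-- while the minimum is still below K): A returns iff the list is nonempty and either
-- every pepper is already ≥ K or the fully-mixed-down value mixAll is ≥ K.  Every input
-- on which A returns satisfies Pre_; B raises IndexError on the same excluded inputs.
def Pre_solution (scoville : List Int) (K : Int) : Prop :=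
  scoville ≠ [] ∧ ((∀ x ∈ scoville, K ≤ x) ∨ K ≤ mixAll scoville)
instance (scoville : List Int) (K : Int) : Decidable (Pre_solution scoville K) := by
  unfold Pre_solution; infer_instance

def pvWitness_solution : List Int × Int := ([1, 2, 10], 1)

def Spec_solution (scoville : List Int) (K : Int) (out : Int) : Prop := out = solution_alt scoville K
instance (scoville : List Int) (K : Int) (out : Int) : Decidable (Spec_solution scoville K out) := by unfold Spec_solution; infer_instance

-- ===== CLAIM (what is proved, stated in full; the proofs are below) =====
def Claim_equal_solution : Prop := ∀ (scoville : List Int) (K : Int), Dom_solution scoville K → Pre_solution scoville K → Spec_solution scoville K (solution scoville K)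

-- ===== LEMMAS AND PROOFS =====

theorem solGo_nil {sc : List Int} {K c : Int} (h : PySem.List.pyGet? sc 0 = none) :
    solGo sc K c = c := by
  rw [solGo]; split <;> simp_all

theorem solGo_stop {sc : List Int} {K c s0 : Int} (h0 : PySem.List.pyGet? sc 0 = some s0)
    (hK : ¬ s0 < K) : solGo sc K c = c := by
  rw [solGo]; split <;> simp_all

theorem solGo_one {sc : List Int} {K c s0 : Int} (h0 : PySem.List.pyGet? sc 0 = some s0)
    (hK : s0 < K) (h1 : PySem.List.pyGet? sc 1 = none) : solGo sc K c = c := by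
  rw [solGo]; split <;> simp_all
  split <;> simp_all

theorem solGo_step {sc : List Int} {K c s0 s1 : Int} (h0 : PySem.List.pyGet? sc 0 = some s0)
    (hK : s0 < K) (h1 : PySem.List.pyGet? sc 1 = some s1) :
    solGo sc K c
      = solGo (PySem.List.sorted (sc.drop 2 ++ [s0 + s1 * 2]) (fun x => x)) K (c + 1) := by
  rw [solGo]; split <;> simp_all
  split <;> simp_all

theorem altGo_none {base made : List Int} {K c : Int} (h : popMin base made = none) :
    altGo base made K c = c := by
  rw [altGo]; split <;> simp_all

theorem altGo_stop {base made : List Int} {K c a : Int} {b1 m1 : List Int}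
    (h : popMin base made = some (a, b1, m1)) (hK : K ≤ a) : altGo base made K c = c := by
  rw [altGo]; split <;> simp_all

theorem altGo_one {base made : List Int} {K c a : Int} {b1 m1 : List Int}
    (h : popMin base made = some (a, b1, m1)) (hK : ¬ K ≤ a)
    (h2 : popMin b1 m1 = none) : altGo base made K c = c := by
  rw [altGo]; split <;> simp_all
  split <;> simp_all

theorem altGo_step {base made : List Int} {K c a b : Int} {b1 m1 b2 m2 : List Int}
    (h : popMin base made = some (a, b1, m1)) (hK : ¬ K ≤ a)
    (h2 : popMin b1 m1 = some (b, b2, m2)) :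
    altGo base made K c = altGo b2 (m2 ++ [a + 2 * b]) K (c + 1) := by
  rw [altGo]
  split
  · simp_all
  · rename_i a' b1' m1' heq
    rw [h] at heq
    simp only [Option.some.injEq, Prod.mk.injEq] at heq
    obtain ⟨rfl, rfl, rfl⟩ := heq
    rw [if_neg hK]
    split
    · simp_all
    · rename_i b' b2' m2' heq2
      rw [h2] at heq2
      simp only [Option.some.injEq, Prod.mk.injEq] at heq2
      obtain ⟨rfl, rfl, rfl⟩ := heq2
      rfl

theorem popMin_none_iff {base made : List Int} :
    popMin base made = none ↔ base = [] ∧ made = [] := by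
  rcases base with _ | ⟨b, bs⟩ <;> rcases made with _ | ⟨m, ms⟩ <;> simp [popMin]
  split <;> simp

theorem popMin_cases {base made : List Int} {x : Int} {b2 m2 : List Int}
    (h : popMin base made = some (x, b2, m2)) :
    (∃ bs, base = x :: bs ∧ b2 = bs ∧ m2 = made) ∨
    (∃ ms, made = x :: ms ∧ b2 = base ∧ m2 = ms) := by
  rcases base with _ | ⟨b, bs⟩ <;> rcases made with _ | ⟨m, ms⟩
  case nil.nil => simp [popMin] at h
  case nil.cons =>
    simp only [popMin, Option.some.injEq, Prod.mk.injEq] at h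
    obtain ⟨rfl, rfl, rfl⟩ := h; right; exact ⟨ms, rfl, rfl, rfl⟩
  case cons.nil =>
    simp only [popMin, Option.some.injEq, Prod.mk.injEq] at h
    obtain ⟨rfl, rfl, rfl⟩ := h; left; exact ⟨bs, rfl, rfl, rfl⟩
  case cons.cons =>
    simp only [popMin] at h
    split at h <;>
        (simp only [Option.some.injEq, Prod.mk.injEq] at h
         obtain ⟨rfl, rfl, rfl⟩ := h)
    · left; exact ⟨bs, rfl, rfl, rfl⟩
    · right; exact ⟨ms, rfl, rfl, rfl⟩

theorem popMin_min {base made : List Int} {x : Int} {b2 m2 : List Int}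
    (hb : base.Pairwise (· ≤ ·)) (hm : made.Pairwise (· ≤ ·))
    (h : popMin base made = some (x, b2, m2)) :
    ∀ y ∈ b2 ++ m2, x ≤ y := by
  rcases base with _ | ⟨b, bs⟩ <;> rcases made with _ | ⟨m, ms⟩
  case nil.nil => simp [popMin] at h
  case nil.cons =>
    simp only [popMin, Option.some.injEq, Prod.mk.injEq] at h
    obtain ⟨rfl, rfl, rfl⟩ := h
    simpa using fun y hy => List.rel_of_pairwise_cons hm hy
  case cons.nil =>
    simp only [popMin, Option.some.injEq, Prod.mk.injEq] at h
    obtain ⟨rfl, rfl, rfl⟩ := h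
    simpa using fun y hy => List.rel_of_pairwise_cons hb hy
  case cons.cons =>
    have hbs : ∀ y ∈ bs, b ≤ y := fun y hy => List.rel_of_pairwise_cons hb hy
    have hms : ∀ y ∈ ms, m ≤ y := fun y hy => List.rel_of_pairwise_cons hm hy
    simp only [popMin] at h
    split at h <;>
        (simp only [Option.some.injEq, Prod.mk.injEq] at h
         obtain ⟨rfl, rfl, rfl⟩ := h) <;> rename_i hle <;> intro y hy
    · rcases List.mem_append.mp hy with hy | hy
      · exact hbs y hy
      · rcases List.mem_cons.mp hy with rfl | hy
        · exact hle
        · exact le_trans hle (hms y hy)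
    · rcases List.mem_append.mp hy with hy | hy
      · rcases List.mem_cons.mp hy with rfl | hy
        · omega
        · exact le_of_lt (lt_of_lt_of_le (by omega) (hbs y hy))
      · exact hms y hy

theorem popMin_perm {base made : List Int} {x : Int} {b2 m2 : List Int}
    (h : popMin base made = some (x, b2, m2)) :
    (base ++ made).Perm (x :: (b2 ++ m2)) := by
  rcases popMin_cases h with ⟨bs, rfl, rfl, rfl⟩ | ⟨ms, rfl, rfl, rfl⟩
  · simp
  · exact List.perm_middle

theorem popMin_made_sub {base made : List Int} {x : Int} {b2 m2 : List Int}
    (h : popMin base made = some (x, b2, m2)) : ∀ z ∈ m2, z ∈ made := by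
  rcases popMin_cases h with ⟨bs, rfl, rfl, rfl⟩ | ⟨ms, rfl, rfl, rfl⟩ <;>
    intro z hz <;> simp_all

theorem popMin_sorted {base made : List Int} {x : Int} {b2 m2 : List Int}
    (hb : base.Pairwise (· ≤ ·)) (hm : made.Pairwise (· ≤ ·))
    (h : popMin base made = some (x, b2, m2)) :
    b2.Pairwise (· ≤ ·) ∧ m2.Pairwise (· ≤ ·) := by
  rcases popMin_cases h with ⟨bs, rfl, rfl, rfl⟩ | ⟨ms, rfl, rfl, rfl⟩
  · exact ⟨(List.pairwise_cons.mp hb).2, hm⟩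
  · exact ⟨hb, (List.pairwise_cons.mp hm).2⟩

-- a sorted permutation of x :: rest with x minimal starts with x
theorem sorted_head_eq {sc rest : List Int} {x : Int}
    (hsc : sc.Pairwise (· ≤ ·)) (hperm : sc.Perm (x :: rest)) (hx : ∀ y ∈ rest, x ≤ y) :
    ∃ t, sc = x :: t ∧ t.Perm rest := by
  rcases sc with _ | ⟨s0, t⟩
  · exact absurd hperm.length_eq (by simp)
  · have hs0x : s0 = x := by
      have h1 : s0 ∈ x :: rest := hperm.mem_iff.mp (by simp)
      have h2 : x ∈ s0 :: t := hperm.mem_iff.mpr (by simp)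
      have hle : ∀ y ∈ t, s0 ≤ y := fun y hy => List.rel_of_pairwise_cons hsc hy
      rcases List.mem_cons.mp h1 with h1 | h1
      · exact h1
      · rcases List.mem_cons.mp h2 with h2 | h2
        · omega
        · exact le_antisymm (hx s0 h1) (hle x h2) |>.symm
    subst hs0x
    exact ⟨t, rfl, hperm.cons_inv⟩

-- the two-queue invariant: both queues sorted, L below everything in base and in all of
-- made but its last element, and all of made within 3L (so the next created value cannot
-- undercut the created values still queued)
def TwoQ (base made : List Int) (L : Int) : Prop :=
  base.Pairwise (· ≤ ·) ∧ made.Pairwise (· ≤ ·) ∧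
  (∀ z ∈ base, L ≤ z) ∧ (∀ m ∈ made.dropLast, L ≤ m) ∧ (∀ m ∈ made, m ≤ 3 * L)

theorem mem_dropLast_cons {a : Int} {l : List Int} (h : l ≠ []) : a ∈ (a :: l).dropLast := by
  rcases l with _ | ⟨b, t⟩ <;> simp_all

theorem mem_dropLast_cons_cons {x y : Int} {l : List Int} (h : l ≠ []) :
    y ∈ (x :: y :: l).dropLast := by
  rcases l with _ | ⟨b, t⟩ <;> simp_all

theorem key_bounds {base made : List Int} {L x y : Int} {b2 m2 b3 m3 : List Int}
    (hInv : TwoQ base made L)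
    (h1 : popMin base made = some (x, b2, m2))
    (h2 : popMin b2 m2 = some (y, b3, m3))
    (hm3 : m3 ≠ []) : L ≤ x ∧ L ≤ y := by
  obtain ⟨_, _, hLb, hLd, _⟩ := hInv
  rcases popMin_cases h1 with ⟨bs, hbase, rfl, rfl⟩ | ⟨ms, hmade, rfl, rfl⟩
  · have hx : L ≤ x := hLb x (by simp [hbase])
    rcases popMin_cases h2 with ⟨bs', hbs, rfl, rfl⟩ | ⟨ms', hms, rfl, rfl⟩
    · exact ⟨hx, hLb y (by simp [hbase, hbs])⟩
    · subst hms
      exact ⟨hx, hLd y (mem_dropLast_cons hm3)⟩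
  · rcases popMin_cases h2 with ⟨bs', hbs, rfl, rfl⟩ | ⟨ms', hms, rfl, rfl⟩
    · subst hmade
      refine ⟨hLd x (mem_dropLast_cons ?_), hLb y (by simp [hbs])⟩
      intro hnil; exact hm3 (by simp_all)
    · subst hms
      subst hmade
      exact ⟨hLd x (mem_dropLast_cons (by simp)), hLd y (mem_dropLast_cons_cons hm3)⟩

theorem mainGo : ∀ (n : Nat) (base made sc : List Int) (K c L : Int),
    base.length + made.length ≤ n → TwoQ base made L →
    sc.Pairwise (· ≤ ·) → sc.Perm (base ++ made) →
    solGo sc K c = altGo base made K c := by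
  intro n
  induction n with
  | zero =>
    intro base made sc K c L hlen _ _ hperm
    have hb : base = [] := by cases base <;> simp_all
    have hm : made = [] := by cases made <;> simp_all
    subst hb; subst hm
    have hsc : sc = [] := by
      have := hperm.length_eq; cases sc <;> simp_all
    subst hsc
    rw [solGo_nil (by simp [PySem.List.pyGet?, PySem.List.pyIdx?]),
        altGo_none (by simp [popMin])]
  | succ n ih =>
    intro base made sc K c L hlen hInv hsc hperm
    obtain ⟨hbS, hmS, hLb, hLd, hL3⟩ := hInv
    cases hpop : popMin base made with
    | none =>
      obtain ⟨rfl, rfl⟩ := popMin_none_iff.mp hpop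
      have hsc0 : sc = [] := by
        have := hperm.length_eq; cases sc <;> simp_all
      subst hsc0
      rw [solGo_nil (by simp [PySem.List.pyGet?, PySem.List.pyIdx?]), altGo_none hpop]
    | some t1 =>
      obtain ⟨x, b2, m2⟩ := t1
      have hmin1 := popMin_min hbS hmS hpop
      obtain ⟨t, rfl, htp⟩ := sorted_head_eq hsc (hperm.trans (popMin_perm hpop)) hmin1
      have hget0 : PySem.List.pyGet? (x :: t) 0 = some x := by
        simp [PySem.List.pyGet?, PySem.List.pyIdx?]
      by_cases hK : x < K
      · obtain ⟨hb2S, hm2S⟩ := popMin_sorted hbS hmS hpop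
        have htS : t.Pairwise (· ≤ ·) := (List.pairwise_cons.mp hsc).2
        cases hpop2 : popMin b2 m2 with
        | none =>
          obtain ⟨rfl, rfl⟩ := popMin_none_iff.mp hpop2
          have ht0 : t = [] := by
            have := htp.length_eq; cases t <;> simp_all
          subst ht0
          rw [solGo_one hget0 hK (by simp [PySem.List.pyGet?, PySem.List.pyIdx?]),
              altGo_one hpop (by omega) hpop2]
        | some t2 =>
          obtain ⟨y, b3, m3⟩ := t2
          have hmin2 := popMin_min hb2S hm2S hpop2
          obtain ⟨r, rfl, hrp⟩ := sorted_head_eq htS (htp.trans (popMin_perm hpop2)) hmin2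
          have hget1 : PySem.List.pyGet? (x :: y :: r) 1 = some y := by
            simp [PySem.List.pyGet?, PySem.List.pyIdx?]
          have hxy : x ≤ y := by
            apply hmin1
            rcases popMin_cases hpop2 with ⟨bs', hbs, _, _⟩ | ⟨ms', hms, _, _⟩
            · exact List.mem_append.mpr (Or.inl (by simp [hbs]))
            · exact List.mem_append.mpr (Or.inr (by simp [hms]))
          rw [solGo_step hget0 hK hget1, altGo_step hpop (by omega) hpop2]
          have hv : x + y * 2 = x + 2 * y := by ring
          have hdrop : (x :: y :: r).drop 2 = r := by simp
          rw [hdrop, hv]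
          -- invariant for the next state, with new lower bound y
          have hsub2 : ∀ z ∈ m2, z ∈ made := popMin_made_sub hpop
          have hsub3 : ∀ z ∈ m3, z ∈ made := fun z hz => hsub2 z (popMin_made_sub hpop2 z hz)
          have hkb : m3 ≠ [] → L ≤ x ∧ L ≤ y :=
            key_bounds ⟨hbS, hmS, hLb, hLd, hL3⟩ hpop hpop2
          have hm3le : ∀ m ∈ m3, m ≤ x + 2 * y := by
            intro m hm
            have hLm := hL3 m (hsub3 m hm)
            have := hkb (by intro hnil; simp_all)
            omega
          obtain ⟨hb3S, hm3S⟩ := popMin_sorted hb2S hm2S hpop2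
          apply ih b3 (m3 ++ [x + 2 * y]) _ K (c + 1) y
          · have l1 := popMin_length hpop
            have l2 := popMin_length hpop2
            simp only [List.length_append, List.length_cons] at *
            simp
            omega
          · refine ⟨hb3S, ?_, ?_, ?_, ?_⟩
            · refine List.pairwise_append.mpr ⟨hm3S, by simp, ?_⟩
              intro m hm z hz
              rcases List.mem_singleton.mp hz with rfl
              exact hm3le m hm
            · exact fun z hz => hmin2 z (List.mem_append.mpr (Or.inl hz))
            · rw [List.dropLast_concat]
              exact fun m hm => hmin2 m (List.mem_append.mpr (Or.inr hm))
            · intro m hm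
              rcases List.mem_append.mp hm with hm | hm
              · have hLm := hL3 m (hsub3 m hm)
                have := hkb (by intro hnil; simp_all)
                omega
              · rcases List.mem_singleton.mp hm with rfl
                omega
          · simpa using PySem.List.sorted_pairwise (r ++ [x + 2 * y]) (fun x => x)
          · refine (PySem.List.sorted_perm _ _ _).trans ?_
            refine ((hrp.append_right [x + 2 * y]).trans ?_)
            rw [List.append_assoc]
      · rw [solGo_stop hget0 hK, altGo_stop hpop (by omega)]

-- ===== VERDICT (by name: the statement is the Claim_ definition above) =====
theorem solution_spec : Claim_equal_solution := by
  unfold Claim_equal_solution Spec_solution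
  intro scoville K _hdom _hpre
  unfold solution solution_alt
  have hS : (PySem.List.sorted scoville (fun x => x)).Pairwise (· ≤ ·) := by
    simpa using PySem.List.sorted_pairwise scoville (fun x => x)
  rcases hss : PySem.List.sorted scoville (fun x => x) with _ | ⟨h0, tl⟩
  · rw [solGo_nil (by simp [PySem.List.pyGet?, PySem.List.pyIdx?]),
        altGo_none (by simp [popMin])]
  · rw [← hss]
    apply mainGo ((PySem.List.sorted scoville (fun x => x)).length) _ [] _ K 0 h0
    · simp
    · refine ⟨hS, by simp, ?_, by simp, by simp⟩
      intro z hz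
      rw [hss] at hz
      rcases List.mem_cons.mp hz with rfl | hz
      · omega
      · rw [hss] at hS; exact List.rel_of_pairwise_cons hS hz
    · exact hS
    · simp
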